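-- pv_equiv track=rewrite | github.com/georgevenven/personal-site | database.py | dateParser
-- ===== SOURCE A (Python) =====
-- def dateParser(date):
--     newDate =''
--
--     for x in range(len(date)):
--         if x > 3 and x < 10:
--             newDate = newDate + date[x]
--         if x > 18:
--             newDate = newDate + date[x]
--
--     return newDate
-- ===== SOURCE B (Python) =====
-- def dateParser(date):
--     # closed-form: the loop collects exactly indices 4..9 and 19.. in order
--     return date[4:10] + date[19:]
-- ===== Notes on version B (the rewrite author's own statement) =====
-- stated objective: simpler
-- what changed: Replaced the per-index loop with two conditional character appends by a closed-form extraction of the two fixed index ranges via slices, date[4:10] + date[19:].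
import Mathlib
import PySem

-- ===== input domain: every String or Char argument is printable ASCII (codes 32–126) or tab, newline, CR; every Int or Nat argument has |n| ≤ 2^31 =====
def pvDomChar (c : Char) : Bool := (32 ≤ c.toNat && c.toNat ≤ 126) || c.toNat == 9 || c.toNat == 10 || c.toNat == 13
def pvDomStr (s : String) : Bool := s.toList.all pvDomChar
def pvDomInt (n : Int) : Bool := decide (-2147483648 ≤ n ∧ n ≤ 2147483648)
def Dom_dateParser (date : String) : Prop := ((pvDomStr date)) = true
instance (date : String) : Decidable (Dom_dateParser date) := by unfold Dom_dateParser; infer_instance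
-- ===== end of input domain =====

-- B replaces A's per-index loop by a closed-form extraction of the two fixed ranges (simpler).

-- ===== PORT A =====
-- the loop body: two independent ifs, each appending date[x]
def dateParserStep (l : List Char) (newDate : List Char) (x : Int) : List Char :=
  let newDate :=
    if 3 < x ∧ x < 10 then
      match PySem.List.pyGet? l x with
      | some c => newDate ++ [c]
      | none => newDate      -- unreachable: x ∈ range(len(date))
    else newDate
  if 18 < x then
    match PySem.List.pyGet? l x with
    | some c => newDate ++ [c]
    | none => newDate        -- unreachable
  else newDate

def dateParser (date : String) : String :=
  String.ofList ((PySem.List.pyRange 0 (date.toList.length : Int) 1).foldl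
    (dateParserStep date.toList) [])

-- ===== PORT B =====
def dateParser_alt (date : String) : String :=
  PySem.Str.slice date (some 4) (some 10) ++ PySem.Str.slice date (some 19) none

-- ===== PRECONDITION & SPEC =====
def Spec_dateParser (date : String) (out : String) : Prop := out = dateParser_alt date
instance (date : String) (out : String) : Decidable (Spec_dateParser date out) := by unfold Spec_dateParser; infer_instance

-- ===== CLAIM (what is proved, stated in full; the proofs are below) =====
def Claim_equal_dateParser : Prop := ∀ (date : String), Dom_dateParser date → Spec_dateParser date (dateParser date)

-- ===== LEMMAS AND PROOFS =====

-- loop invariant: after processing indices 0..n-1, the accumulator is the two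
-- slices of the prefix of length n
lemma dateParser_loop (l : List Char) (n : Nat) (hn : n ≤ l.length) :
    (PySem.List.pyRange 0 (n : Int) 1).foldl (dateParserStep l) []
      = ((l.take n).drop 4).take 6 ++ (l.take n).drop 19 := by
  induction n with
  | zero => simp [PySem.List.pyRange_one_eq_nil]
  | succ n ih =>
    have hn' : n ≤ l.length := Nat.le_of_succ_le hn
    have hlt : n < l.length := hn
    have hsplit : (PySem.List.pyRange 0 ((n + 1 : Nat) : Int) 1)
        = PySem.List.pyRange 0 (n : Int) 1 ++ [(n : Int)] := by
      push_cast
      exact PySem.List.pyRange_one_succ_right (by positivity)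
    rw [hsplit, List.foldl_append, ih hn']
    have hget : PySem.List.pyGet? l (n : Int) = some l[n] :=
      PySem.List.pyGet?_ofNat l n hlt
    have htake : l.take (n + 1) = l.take n ++ [l[n]] := by
      rw [List.take_add_one]
      simp [List.getElem?_eq_getElem hlt]
    rw [htake]
    have hlen : (l.take n).length = n := List.length_take_of_le hn'
    simp only [List.foldl_cons, List.foldl_nil, dateParserStep, hget]
    by_cases h1 : 3 < (n : Int) ∧ (n : Int) < 10
    · -- 4 ≤ n ≤ 9 : the char joins the first slice; drop-19 parts are empty
      have h2 : ¬ (18 < (n : Int)) := by omega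
      have hd4 : (4 : Nat) - n = 0 := by omega
      have e0 : (l.take n).drop 19 = [] := List.drop_eq_nil_of_le (by omega)
      have eX : ((l.take n).drop 4).take 6 = (l.take n).drop 4 :=
        List.take_of_length_le (by simp [hlen]; omega)
      have e5 : [l[n]].drop (19 - n) = [] :=
        List.drop_eq_nil_of_le (by simp; omega)
      have e6 : ((l.take n).drop 4 ++ [l[n]]).take 6
          = (l.take n).drop 4 ++ [l[n]] :=
        List.take_of_length_le (by simp [hlen]; omega)
      rw [if_pos h1, if_neg h2, List.drop_append, List.drop_append, hlen,
        hd4, List.drop_zero, e6, e0, e5, eX]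
      simp
    · by_cases h2 : 18 < (n : Int)
      · -- n ≥ 19 : the char joins the drop-19 tail
        have hd4 : (4 : Nat) - n = 0 := by omega
        have hd19 : (19 : Nat) - n = 0 := by omega
        have e6 : ((l.take n).drop 4 ++ [l[n]]).take 6
            = ((l.take n).drop 4).take 6 :=
          List.take_append_of_le_length (by simp [hlen]; omega)
        rw [if_neg h1, if_pos h2, List.drop_append, List.drop_append, hlen,
          hd4, hd19, List.drop_zero, e6, List.append_assoc]
      · -- n ≤ 3 or 10 ≤ n ≤ 18 : the char is kept by neither slice
        rw [if_neg h1, if_neg h2, List.drop_append, List.drop_append, hlen]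
        have e5 : [l[n]].drop (19 - n) = [] :=
          List.drop_eq_nil_of_le (by simp; omega)
        rcases Nat.lt_or_ge n 4 with h4 | h4
        · have e1 : [l[n]].drop (4 - n) = [] :=
            List.drop_eq_nil_of_le (by simp; omega)
          rw [e1, e5, List.append_nil, List.append_nil]
        · have hd4 : (4 : Nat) - n = 0 := by omega
          have e6 : ((l.take n).drop 4 ++ [l[n]]).take 6
              = ((l.take n).drop 4).take 6 :=
            List.take_append_of_le_length (by simp [hlen]; omega)
          rw [hd4, List.drop_zero, e6, e5, List.append_nil]

lemma dateParser_eq (date : String) :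
    dateParser date = dateParser_alt date := by
  unfold dateParser dateParser_alt
  rw [dateParser_loop date.toList date.toList.length le_rfl]
  have h4 : PySem.List.slice date.toList (some 4) (some 10)
      = (date.toList.drop 4).take 6 := by
    rw [PySem.List.slice_toNat date.toList (by norm_num) (by norm_num)]
    rfl
  have h19 : PySem.List.slice date.toList (some 19) none
      = date.toList.drop 19 := by
    rw [PySem.List.slice_from date.toList (by norm_num)]
    rfl
  have ht : date.toList.take date.length = date.toList :=
    List.take_of_length_le (by simp)
  apply String.toList_inj.mp
  simp [PySem.Str.toList_slice, h4, h19, ht]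

-- ===== VERDICT (by name: the statement is the Claim_ definition above) =====
theorem dateParser_spec : Claim_equal_dateParser := by
  intro date _
  exact dateParser_eq date
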